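-- pv_equiv track=rewrite | github.com/Vix-Hub/FOOT | PRIN22/Trento_Run/Reconstruction_Code/functions.py | eliminate_equivalent_lists
-- ===== SOURCE A (Python) =====
-- def eliminate_equivalent_lists(lists):
--     # Create a dictionary to store the longest list for each unique tuple
--     max_lists = {}
--
--     for lst in lists:
--         # Extract the unique tuple from the list
--         unique_tuple = set([item[0] for item in lst])
--
--         # Convert the tuple to a frozenset to make it hashable
--         unique_tuple = frozenset(unique_tuple)
--
--         # Check if this tuple is already in the dictionary
--         if unique_tuple in max_lists:
--             # If the current list is longer than the one in the dictionary, replace it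
--             if len(lst) > len(max_lists[unique_tuple]):
--                 max_lists[unique_tuple] = lst
--         else:
--             # If the tuple is not in the dictionary, add it with the current list
--             max_lists[unique_tuple] = lst
--
--     # Convert the values of the dictionary back to a list
--     result = list(max_lists.values())
--
--     return result
-- ===== SOURCE B (Python) =====
-- def eliminate_equivalent_lists(lists):
--     # Pass 1: group all lists by their frozenset-of-first-elements key,
--     # preserving first-appearance key order.
--     groups = {}
--     for lst in lists:
--         key = frozenset(item[0] for item in lst)
--         groups.setdefault(key, []).append(lst)
--     # Pass 2: per group, keep the longest list (max keeps the first maximum,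
--     # matching the strict '>' replacement of the running-max approach).
--     return [max(group, key=len) for group in groups.values()]
-- ===== Notes on version B (the rewrite author's own statement) =====
-- stated objective: alternative
-- what changed: Replaces the single running-max-per-key loop by a two-pass decomposition: first group every list under its frozenset key (dict of groups in first-appearance order), then select max(group, key=len) per group, relying on max returning the first maximal element to match A's strict '>' tie-breaking.
import Mathlib
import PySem

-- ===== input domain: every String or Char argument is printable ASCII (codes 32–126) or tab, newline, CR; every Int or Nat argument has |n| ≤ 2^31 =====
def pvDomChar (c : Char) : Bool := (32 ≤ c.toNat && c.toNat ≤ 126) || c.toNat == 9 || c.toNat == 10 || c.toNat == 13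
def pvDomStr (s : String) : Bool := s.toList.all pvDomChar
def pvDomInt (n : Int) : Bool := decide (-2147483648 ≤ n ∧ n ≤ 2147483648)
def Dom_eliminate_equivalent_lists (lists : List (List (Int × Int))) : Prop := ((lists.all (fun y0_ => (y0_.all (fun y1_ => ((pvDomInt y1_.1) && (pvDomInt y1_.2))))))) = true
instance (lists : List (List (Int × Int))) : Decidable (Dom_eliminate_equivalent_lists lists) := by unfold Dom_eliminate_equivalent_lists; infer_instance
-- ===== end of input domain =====

-- B replaces A's running-max-per-key dict by a two-pass decomposition (group all lists per key,
-- then pick the longest of each group); alternative structure, same cost, proved equal.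


-- ===== PORT A =====
-- frozenset(item[0] for item in lst), modelled as the sorted list of the distinct first
-- components: exact, since frozenset equality is set equality, dict behaviour depends on
-- keys only through equality, and keys never reach the output.
def pvFsKey (lst : List (Int × Int)) : List Int :=
  PySem.List.sorted (PySem.Set.ofList (lst.map (fun item => item.1))) (fun x => x) false

def eliminate_equivalent_lists (lists : List (List (Int × Int))) : List (List (Int × Int)) :=
  let max_lists : PySem.Dict (List Int) (List (Int × Int)) :=
    lists.foldl (fun max_lists lst =>
      let unique_tuple := pvFsKey lst
      if max_lists.contains unique_tuple then
        -- max_lists[unique_tuple]: key present, so getD is exact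
        if PySem.List.len lst > PySem.List.len (max_lists.getD unique_tuple []) then
          max_lists.insert unique_tuple lst
        else
          max_lists
      else
        max_lists.insert unique_tuple lst) PySem.Dict.empty
  max_lists.values

-- ===== PORT B =====
def eliminate_equivalent_lists_alt (lists : List (List (Int × Int))) : List (List (Int × Int)) :=
  -- groups.setdefault(key, []).append(lst)  =  groups[key] = groups.get(key, []) + [lst]  =  Dict.modify
  let groups : PySem.Dict (List Int) (List (List (Int × Int))) :=
    lists.foldl (fun groups lst => groups.modify (pvFsKey lst) [] (fun g => g ++ [lst])) PySem.Dict.empty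
  -- max(group, key=len) is PySem.List.max?; every group is nonempty, so filterMap drops nothing
  groups.values.filterMap (fun group => PySem.List.max? group (fun l => PySem.List.len l))

-- ===== PRECONDITION & SPEC =====
def Spec_eliminate_equivalent_lists (lists : List (List (Int × Int))) (out : List (List (Int × Int))) : Prop := out = eliminate_equivalent_lists_alt lists
instance (lists : List (List (Int × Int))) (out : List (List (Int × Int))) : Decidable (Spec_eliminate_equivalent_lists lists out) := by unfold Spec_eliminate_equivalent_lists; infer_instance

-- ===== CLAIM (what is proved, stated in full; the proofs are below) =====
def Claim_equal_eliminate_equivalent_lists : Prop := ∀ (lists : List (List (Int × Int))), Dom_eliminate_equivalent_lists lists → Spec_eliminate_equivalent_lists lists (eliminate_equivalent_lists lists)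

-- ===== LEMMAS AND PROOFS =====

-- the list max(group, key=len) returns (first maximal element), as a total function on nonempty groups
def pvCm (g : List (List (Int × Int))) : List (Int × Int) :=
  (PySem.List.max? g (fun l => PySem.List.len l)).getD []

lemma pvMax?_eq_some_cm (g : List (List (Int × Int))) (h : g ≠ []) :
    PySem.List.max? g (fun l => PySem.List.len l) = some (pvCm g) := by
  cases hm : PySem.List.max? g (fun l => PySem.List.len l) with
  | none => exact absurd ((PySem.List.max?_eq_none_iff _ _).mp hm) h
  | some m => simp only [pvCm, hm, Option.getD_some]

lemma pvCm_append (g : List (List (Int × Int))) (x : List (Int × Int)) (h : g ≠ []) :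
    pvCm (g ++ [x]) = if PySem.List.len (pvCm g) < PySem.List.len x then x else pvCm g := by
  have h2 := pvMax?_eq_some_cm g h
  rw [PySem.List.max?] at h2
  show (PySem.List.max? (g ++ [x]) (fun l => PySem.List.len l)).getD [] = _
  rw [PySem.List.max?, List.foldl_append, h2]
  show (if PySem.List.len (pvCm g) < PySem.List.len x then some x else some (pvCm g)).getD [] = _
  by_cases hlt : PySem.List.len (pvCm g) < PySem.List.len x
  · rw [if_pos hlt, if_pos hlt]; rfl
  · rw [if_neg hlt, if_neg hlt]; rfl

-- invariant relating A's dict (key ↦ current longest) to B's dict (key ↦ group)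
def pvRel (dA : PySem.Dict (List Int) (List (Int × Int)))
    (dB : PySem.Dict (List Int) (List (List (Int × Int)))) : Prop :=
  dA.items = dB.items.map (fun p => (p.1, pvCm p.2)) ∧
  (dB.items.map Prod.fst).Nodup ∧
  ∀ p ∈ dB.items, p.2 ≠ []

lemma pvFind?_eq_of_mem_nodup {l : List (List Int × List (List (Int × Int)))}
    (hnd : (l.map Prod.fst).Nodup) {p} (hp : p ∈ l) :
    l.find? (fun q => q.1 == p.1) = some p := by
  induction l with
  | nil => simp at hp
  | cons a t ih =>
    simp only [List.map_cons, List.nodup_cons] at hnd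
    rcases List.mem_cons.mp hp with hp | hp
    · subst hp; simp
    · have hne : (a.1 == p.1) = false := by
        simp only [beq_eq_false_iff_ne, ne_eq]
        intro he; exact hnd.1 (he ▸ List.mem_map_of_mem hp)
      simp [hne, ih hnd.2 hp]

lemma pvFind?_map (l : List (List Int × List (List (Int × Int)))) (k : List Int) :
    List.find? (fun q => q.1 == k) (l.map (fun p => (p.1, pvCm p.2)))
      = (List.find? (fun q => q.1 == k) l).map (fun p => (p.1, pvCm p.2)) := by
  induction l with
  | nil => rfl
  | cons a t ih =>
    by_cases hak : (a.1 == k) = true <;> simp [hak, ih]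

lemma pvNodup_subst (l : List (List Int × List (List (Int × Int)))) (k : List Int)
    (v : List (List (Int × Int))) (hnd : (l.map Prod.fst).Nodup) :
    ((l.map (fun p => if (p.1 == k) = true then (k, v) else p)).map Prod.fst).Nodup := by
  rw [List.map_map]
  have h : l.map (Prod.fst ∘ fun p => if (p.1 == k) = true then (k, v) else p) = l.map Prod.fst := by
    apply List.map_congr_left; intro p hp
    by_cases hpk : (p.1 == k) = true
    · have hpk' : p.1 = k := by simpa using hpk
      simp [Function.comp, hpk']
    · simp [Function.comp, hpk]
  rw [h]; exact hnd

lemma pvNe_subst (l : List (List Int × List (List (Int × Int)))) (k : List Int)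
    (v : List (List (Int × Int))) (hv : v ≠ []) (hne : ∀ p ∈ l, p.2 ≠ []) :
    ∀ p ∈ l.map (fun p => if (p.1 == k) = true then (k, v) else p), p.2 ≠ [] := by
  intro p hp
  obtain ⟨q, hq, hqe⟩ := List.mem_map.mp hp
  by_cases hpk : (q.1 == k) = true
  · rw [if_pos hpk] at hqe; subst hqe; exact hv
  · rw [if_neg hpk] at hqe; subst hqe; exact hne q hq

lemma pvRel_step (dA : PySem.Dict (List Int) (List (Int × Int)))
    (dB : PySem.Dict (List Int) (List (List (Int × Int)))) (lst : List (Int × Int))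
    (h : pvRel dA dB) :
    pvRel
      (let unique_tuple := pvFsKey lst
       if dA.contains unique_tuple then
         if PySem.List.len lst > PySem.List.len (dA.getD unique_tuple []) then
           dA.insert unique_tuple lst
         else dA
       else dA.insert unique_tuple lst)
      (dB.modify (pvFsKey lst) [] (fun g => g ++ [lst])) := by
  obtain ⟨hit, hnd, hne⟩ := h
  set k := pvFsKey lst with hk
  have hcont : dA.contains k = dB.contains k := by
    rw [PySem.Dict.contains, hit, List.any_map]; rfl
  by_cases hc : dB.contains k = true
  · -- key present: the unique entry p0 with key k
    obtain ⟨p0, hp0mem, hp0k⟩ :=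
      List.any_eq_true.mp (show dB.items.any (fun p => p.1 == k) = true from hc)
    have hp0k' : p0.1 = k := by simpa using hp0k
    have hfindB : dB.items.find? (fun q => q.1 == k) = some p0 := by
      rw [← hp0k']; exact pvFind?_eq_of_mem_nodup hnd hp0mem
    have hgetB : dB.getD k [] = p0.2 := by
      simp [PySem.Dict.getD, PySem.Dict.get?, hfindB]
    have hgetA : dA.getD k [] = pvCm p0.2 := by
      rw [PySem.Dict.getD, PySem.Dict.get?, hit, pvFind?_map, hfindB]; rfl
    have hp0ne : p0.2 ≠ [] := hne p0 hp0mem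
    have hcmapp := pvCm_append p0.2 lst hp0ne
    have hBitems : (dB.modify k [] (fun g => g ++ [lst])).items =
        dB.items.map (fun p => if (p.1 == k) = true then (k, p0.2 ++ [lst]) else p) := by
      simp [PySem.Dict.modify, PySem.Dict.insert, hc, hgetB]
    by_cases hlen : PySem.List.len (pvCm p0.2) < PySem.List.len lst
    · -- A replaces: the grown group's first maximum is lst
      have hcm2 : pvCm (p0.2 ++ [lst]) = lst := by rw [hcmapp, if_pos hlen]
      refine ⟨?_, ?_, ?_⟩
      · simp only [hcont, hc, if_pos, hgetA, gt_iff_lt, hlen, if_pos]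
        rw [PySem.Dict.insert]
        have hcA : dA.contains k = true := by rw [hcont]; exact hc
        simp only [hcA, if_pos, hit, hBitems, List.map_map]
        apply List.map_congr_left
        intro p hp
        by_cases hpk : (p.1 == k) = true
        · simp [Function.comp, hpk, hcm2]
        · simp [Function.comp, hpk]
      · rw [hBitems]; exact pvNodup_subst _ _ _ hnd
      · rw [hBitems]; exact pvNe_subst _ _ _ (by simp) hne
    · -- A keeps: the grown group keeps its first maximum
      have hcm2 : pvCm (p0.2 ++ [lst]) = pvCm p0.2 := by rw [hcmapp, if_neg hlen]
      refine ⟨?_, ?_, ?_⟩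
      · simp only [hcont, hc, if_pos, hgetA, gt_iff_lt, hlen, if_false]
        rw [hit, hBitems, List.map_map]
        apply List.map_congr_left
        intro p hp
        by_cases hpk : (p.1 == k) = true
        · have hpe : p = p0 := by
            have h1 := pvFind?_eq_of_mem_nodup hnd hp
            have hpk' : p.1 = k := by simpa using hpk
            rw [hpk', hfindB] at h1
            exact (Option.some_inj.mp h1).symm
          subst hpe
          simp [Function.comp, hcm2, hp0k']
        · simp [Function.comp, hpk]
      · rw [hBitems]; exact pvNodup_subst _ _ _ hnd
      · rw [hBitems]; exact pvNe_subst _ _ _ (by simp) hne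
  · -- fresh key: both dicts append their new entry
    have hcB : dB.contains k = false := by simpa using hc
    have hcA : dA.contains k = false := by rw [hcont]; exact hcB
    have hnotmem : ∀ p ∈ dB.items, (p.1 == k) = false := by
      intro p hp
      by_contra hx
      have hany : dB.items.any (fun p => p.1 == k) = true :=
        List.any_eq_true.mpr ⟨p, hp, by simpa using hx⟩
      rw [show dB.items.any (fun p => p.1 == k) = dB.contains k from rfl, hcB] at hany
      exact absurd hany (by simp)
    have hgetB : dB.getD k [] = [] := by
      have hfind : dB.items.find? (fun q => q.1 == k) = none :=
        List.find?_eq_none.mpr (fun p hp => by simp [hnotmem p hp])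
      simp [PySem.Dict.getD, PySem.Dict.get?, hfind]
    refine ⟨?_, ?_, ?_⟩
    · simp only [hcont, hcB, Bool.false_eq_true, if_false]
      rw [PySem.Dict.insert, PySem.Dict.modify, PySem.Dict.insert]
      simp only [hcA, hcB, Bool.false_eq_true, if_false, hgetB]
      simp [hit, pvCm, PySem.List.max?]
    · rw [PySem.Dict.modify, PySem.Dict.insert]
      simp only [hcB, Bool.false_eq_true, if_false]
      simp only [List.map_append, List.map_cons, List.map_nil]
      rw [List.nodup_append]
      refine ⟨hnd, by simp, ?_⟩
      intro a ha b hb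
      rw [List.mem_singleton] at hb; subst hb
      intro he; subst he
      obtain ⟨p, hp, hpe⟩ := List.mem_map.mp ha
      exact absurd (hnotmem p hp) (by simp [hpe])
    · intro p hp
      rw [PySem.Dict.modify, PySem.Dict.insert] at hp
      simp only [hcB, Bool.false_eq_true, if_false, hgetB] at hp
      rcases List.mem_append.mp hp with hp | hp
      · exact hne p hp
      · rw [List.mem_singleton] at hp; subst hp; simp

lemma pvRel_foldl (l : List (List (Int × Int)))
    (dA : PySem.Dict (List Int) (List (Int × Int)))
    (dB : PySem.Dict (List Int) (List (List (Int × Int)))) (h : pvRel dA dB) :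
    pvRel
      (l.foldl (fun max_lists lst =>
        let unique_tuple := pvFsKey lst
        if max_lists.contains unique_tuple then
          if PySem.List.len lst > PySem.List.len (max_lists.getD unique_tuple []) then
            max_lists.insert unique_tuple lst
          else max_lists
        else max_lists.insert unique_tuple lst) dA)
      (l.foldl (fun groups lst => groups.modify (pvFsKey lst) [] (fun g => g ++ [lst])) dB) := by
  induction l generalizing dA dB with
  | nil => exact h
  | cons x t ih => exact ih _ _ (pvRel_step dA dB x h)

lemma pvFilterMap_values (l : List (List Int × List (List (Int × Int))))
    (h : ∀ p ∈ l, p.2 ≠ []) :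
    (l.map Prod.snd).filterMap (fun group => PySem.List.max? group (fun x => PySem.List.len x))
      = l.map (fun p => pvCm p.2) := by
  induction l with
  | nil => rfl
  | cons a t ih =>
    simp only [List.map_cons, List.filterMap_cons]
    rw [pvMax?_eq_some_cm a.2 (h a (by simp))]
    rw [ih (fun p hp => h p (by simp [hp]))]

-- ===== VERDICT (by name: the statement is the Claim_ definition above) =====
theorem eliminate_equivalent_lists_spec : Claim_equal_eliminate_equivalent_lists := by
  intro lists _
  unfold Spec_eliminate_equivalent_lists eliminate_equivalent_lists eliminate_equivalent_lists_alt
  have h0 : pvRel PySem.Dict.empty PySem.Dict.empty := by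
    refine ⟨rfl, by simp [PySem.Dict.empty], by simp [PySem.Dict.empty]⟩
  obtain ⟨hit, _, hne⟩ := pvRel_foldl lists _ _ h0
  simp only [PySem.Dict.values, hit, List.map_map]
  rw [pvFilterMap_values _ hne]
  rfl
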